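-- pv_equiv track=rewrite | github.com/Adityatorgal17/AI-Assistant-Conversation-Analysis | conversation_insights/dashboard.py | build_widget_options
-- ===== SOURCE A (Python) =====
-- from typing import Any
--
-- def build_widget_options(dashboard_rows: list[dict[str, Any]]) -> list[dict[str, str]]:
--     seen = set()
--     options = []
--     for row in dashboard_rows:
--         widget_id = row["widgetId"]
--         if widget_id in seen:
--             continue
--         seen.add(widget_id)
--         brand_name = humanize_brand(row.get("brandName")) or widget_id
--         options.append({"widgetId": widget_id, "brandName": brand_name})
--
--     options = sorted(options, key=lambda item: item["widgetId"])
--     for index, item in enumerate(options, start=1):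
--         item["label"] = f"Widget {index} - {item['brandName']}"
--     return options
--
-- def humanize_brand(value: str | None) -> str | None:
--     if not value:
--         return value
--     value = value.replace("_", " ").replace("-", " ").strip()
--     return value.title()
-- ===== SOURCE B (Python) =====
-- def build_widget_options(dashboard_rows):
--     options = []
--     prev_id = None
--     index = 0
--     for row in sorted(dashboard_rows, key=lambda r: r["widgetId"]):
--         widget_id = row["widgetId"]
--         if widget_id == prev_id:
--             continue
--         prev_id = widget_id
--         index += 1
--         brand_name = humanize_brand(row.get("brandName")) or widget_id
--         options.append({
--             "widgetId": widget_id,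
--             "brandName": brand_name,
--             "label": f"Widget {index} - {brand_name}",
--         })
--     return options
--
-- def humanize_brand(value):
--     if not value:
--         return value
--     value = value.replace("_", " ").replace("-", " ").strip()
--     return value.title()
-- ===== Notes on version B (the rewrite author's own statement) =====
-- stated objective: alternative
-- what changed: B sorts the rows first with one stable sort by widgetId and then makes a single fused pass that skips adjacent duplicate ids and numbers/labels with a running counter, replacing A's seen-set dedup pass, separate sort of the built dicts, and separate enumerate-labelling pass.
import Mathlib
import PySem

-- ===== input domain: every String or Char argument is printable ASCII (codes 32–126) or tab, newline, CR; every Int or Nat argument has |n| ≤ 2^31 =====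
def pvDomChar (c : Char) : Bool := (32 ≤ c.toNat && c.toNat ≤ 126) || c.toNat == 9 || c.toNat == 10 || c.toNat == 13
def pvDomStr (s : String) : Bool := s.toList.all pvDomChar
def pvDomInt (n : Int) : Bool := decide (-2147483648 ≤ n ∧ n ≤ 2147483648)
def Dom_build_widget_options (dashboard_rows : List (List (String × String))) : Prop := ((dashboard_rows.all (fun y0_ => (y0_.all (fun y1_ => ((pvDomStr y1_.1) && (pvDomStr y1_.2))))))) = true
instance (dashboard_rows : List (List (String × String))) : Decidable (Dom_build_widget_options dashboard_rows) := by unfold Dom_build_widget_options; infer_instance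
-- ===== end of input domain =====

-- B replaces A's set-based dedup pass + sort + labelling pass by one stable sort followed by a
-- single fused pass that skips adjacent duplicate widgetIds and labels with a running counter
-- (objective: alternative decomposition, same asymptotic cost).

-- ===== PORT A =====
-- str.title() ported by hand (PySem has no title): on ASCII a character is cased iff it is a
-- letter; a letter is uppercased after a non-cased character, lowercased otherwise — exact on
-- the Dom's ASCII strings.
def pyTitleGo (prevCased : Bool) : List Char → List Char
  | [] => []
  | c :: t =>
      if PySem.Chars.isalpha c then
        (if prevCased then PySem.Chars.lowerChar c else PySem.Chars.upperChar c) :: pyTitleGo true t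
      else c :: pyTitleGo false t

def pyTitle (s : String) : String := String.ofList (pyTitleGo false s.toList)

-- helper humanize_brand (identical helper in both Python versions, ported once)
def humanize_brand (value : Option String) : Option String :=
  match value with
  | none => none
  | some s =>
      if s = "" then some s
      else some (pyTitle (PySem.Str.strip (PySem.Str.replace (PySem.Str.replace s "_" " ") "-" " ")))

-- the body of A's first loop, with state (seen, options)
def aStep (st : PySem.Set String × List (PySem.Dict String String)) (row : List (String × String)) :
    PySem.Set String × List (PySem.Dict String String) :=
  let widget_id := (PySem.Dict.mk row).getD "widgetId" ""  -- row["widgetId"]; KeyError excluded by Pre_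
  if PySem.Set.contains st.1 widget_id then st
  else
    let brand_name :=
      match humanize_brand ((PySem.Dict.mk row).get? "brandName") with
      | none => widget_id
      | some s => if s = "" then widget_id else s  -- `humanize_brand(...) or widget_id`
    (PySem.Set.add st.1 widget_id,
     st.2 ++ [PySem.Dict.mk [("widgetId", widget_id), ("brandName", brand_name)]])

def build_widget_options (dashboard_rows : List (List (String × String))) : List (List (String × String)) :=
  let options := (dashboard_rows.foldl aStep (PySem.Set.empty, [])).2
  let options := PySem.List.sorted options (fun item => item.getD "widgetId" "") false
  -- the enumerate loop mutates each dict by adding "label"; dicts are returned as assoc lists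
  ((PySem.List.enumerate options 1).map
    (fun p => p.2.insert "label" ("Widget " ++ PySem.Int.toStr p.1 ++ " - " ++ p.2.getD "brandName" ""))).map
    PySem.Dict.items

-- ===== PORT B =====
-- B's single pass over the sorted rows: prev_id, running index, accumulated options
def bGo (index : Int) (prev_id : Option String) (options : List (List (String × String))) :
    List (List (String × String)) → List (List (String × String))
  | [] => options
  | row :: rest =>
      let widget_id := (PySem.Dict.mk row).getD "widgetId" ""  -- row["widgetId"]; KeyError excluded by Pre_
      if some widget_id == prev_id then bGo index prev_id options rest
      else
        let brand_name :=
          match humanize_brand ((PySem.Dict.mk row).get? "brandName") with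
          | none => widget_id
          | some s => if s = "" then widget_id else s  -- `humanize_brand(...) or widget_id`
        bGo (index + 1) (some widget_id)
          (options ++ [[("widgetId", widget_id), ("brandName", brand_name),
                        ("label", "Widget " ++ PySem.Int.toStr (index + 1) ++ " - " ++ brand_name)]]) rest

def build_widget_options_alt (dashboard_rows : List (List (String × String))) : List (List (String × String)) :=
  bGo 0 none []
    (PySem.List.sorted dashboard_rows (fun r => (PySem.Dict.mk r).getD "widgetId" "") false)

-- ===== PRECONDITION & SPEC =====
-- Pre_ excludes exactly the inputs where the Python raises KeyError: a row without a
-- "widgetId" key (both A and B raise there, A in `row["widgetId"]`, B in the sort key).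
def Pre_build_widget_options (dashboard_rows : List (List (String × String))) : Prop :=
  (dashboard_rows.all (fun r => (PySem.Dict.mk r).contains "widgetId")) = true
instance (dashboard_rows : List (List (String × String))) : Decidable (Pre_build_widget_options dashboard_rows) := by unfold Pre_build_widget_options; infer_instance

def pvWitness_build_widget_options : (List (List (String × String))) :=
  [[("widgetId", "w2"), ("brandName", "acme_co")],
   [("widgetId", "w1")],
   [("widgetId", "w2"), ("brandName", "other")]]

def Spec_build_widget_options (dashboard_rows : List (List (String × String))) (out : List (List (String × String))) : Prop := out = build_widget_options_alt dashboard_rows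
instance (dashboard_rows : List (List (String × String))) (out : List (List (String × String))) : Decidable (Spec_build_widget_options dashboard_rows out) := by unfold Spec_build_widget_options; infer_instance

-- ===== CLAIM (what is proved, stated in full; the proofs are below) =====
def Claim_equal_build_widget_options : Prop := ∀ (dashboard_rows : List (List (String × String))), Dom_build_widget_options dashboard_rows → Pre_build_widget_options dashboard_rows → Spec_build_widget_options dashboard_rows (build_widget_options dashboard_rows)

-- ===== LEMMAS AND PROOFS =====

-- the widgetId key of a row, and the brandName A/B compute for a kept row
def wkey (r : List (String × String)) : String := (PySem.Dict.mk r).getD "widgetId" ""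

def brandOf (r : List (String × String)) : String :=
  match humanize_brand ((PySem.Dict.mk r).get? "brandName") with
  | none => wkey r
  | some s => if s = "" then wkey r else s

def mkItem (r : List (String × String)) : PySem.Dict String String :=
  PySem.Dict.mk [("widgetId", wkey r), ("brandName", brandOf r)]

-- first-occurrence dedup (what A's seen-set loop keeps), seen tracked as a plain list
def dedupF (seen : List String) : List (List (String × String)) → List (List (String × String))
  | [] => []
  | r :: t => if wkey r ∈ seen then dedupF seen t else r :: dedupF (seen ++ [wkey r]) t

-- adjacent dedup relative to the previous kept key (what B's pass keeps)
def adjD (prev : Option String) : List (List (String × String)) → List (List (String × String))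
  | [] => []
  | r :: t => if some (wkey r) == prev then adjD prev t else r :: adjD (some (wkey r)) t

-- the labelled output rows produced for a kept list, numbering from i+1
def labelFrom (i : Int) : List (List (String × String)) → List (List (String × String))
  | [] => []
  | r :: t => [("widgetId", wkey r), ("brandName", brandOf r),
               ("label", "Widget " ++ PySem.Int.toStr (i + 1) ++ " - " ++ brandOf r)] :: labelFrom (i + 1) t

theorem keyitem (r : List (String × String)) : (mkItem r).getD "widgetId" "" = wkey r := by
  simp [mkItem, PySem.Dict.getD, PySem.Dict.get?_mk_cons]

theorem branditem (r : List (String × String)) : (mkItem r).getD "brandName" "" = brandOf r := by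
  simp [mkItem, PySem.Dict.getD, PySem.Dict.get?_mk_cons]

theorem aStep_eq (seen : PySem.Set String) (opts : List (PySem.Dict String String))
    (r : List (String × String)) :
    aStep (seen, opts) r
      = if wkey r ∈ seen then (seen, opts) else (seen ++ [wkey r], opts ++ [mkItem r]) := by
  have hw : (PySem.Dict.mk r).getD "widgetId" "" = wkey r := rfl
  by_cases h : wkey r ∈ seen
  · have hc : PySem.Set.contains seen (wkey r) = true := by simpa [PySem.Set.contains_iff] using h
    simp only [aStep, hw, hc, if_pos h, if_true]
  · have hc : PySem.Set.contains seen (wkey r) = false := by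
      rw [← Bool.not_eq_true]
      simpa [PySem.Set.contains_iff] using h
    have hadd : PySem.Set.add seen (wkey r) = seen ++ [wkey r] := PySem.Set.add_of_not_mem h
    simp only [aStep, hw, hc, if_neg h, hadd, mkItem, brandOf]
    simp

theorem A_fold (l : List (List (String × String))) :
    ∀ (seen : List String) (opts : List (PySem.Dict String String)),
      (l.foldl aStep (seen, opts)).2 = opts ++ (dedupF seen l).map mkItem := by
  induction l with
  | nil => simp [dedupF]
  | cons r t ih =>
      intro seen opts
      rw [List.foldl_cons, aStep_eq]
      by_cases h : wkey r ∈ seen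
      · rw [if_pos h]
        simp only [dedupF, if_pos h]
        exact ih seen opts
      · rw [if_neg h]
        simp only [dedupF, if_neg h]
        rw [ih]
        simp

theorem insertBy_map (ys : List (List (String × String))) (r : List (String × String)) :
    PySem.List.insertBy (fun a b => decide ((a : PySem.Dict String String).getD "widgetId" "" < b.getD "widgetId" ""))
        (mkItem r) (ys.map mkItem)
      = (PySem.List.insertBy (fun a b => decide (wkey a < wkey b)) r ys).map mkItem := by
  induction ys with
  | nil => simp [PySem.List.insertBy]
  | cons y t ih =>
      simp only [List.map_cons, PySem.List.insertBy, keyitem]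
      by_cases h : decide (wkey r < wkey y) = true
      · rw [if_pos h, if_pos h]
        simp only [List.map_cons]
      · rw [if_neg h, if_neg h, ih]
        simp only [List.map_cons]

theorem sorted_map_mkItem (l : List (List (String × String))) :
    PySem.List.sorted (l.map mkItem) (fun item => item.getD "widgetId" "") false
      = (PySem.List.sorted l wkey false).map mkItem := by
  rw [PySem.List.sorted_eq_foldl_insertBy, PySem.List.sorted_eq_foldl_insertBy]
  have main : ∀ (l : List (List (String × String))) (acc : List (List (String × String))),
      List.foldl (fun acc x => PySem.List.insertBy
          (fun a b => decide ((a : PySem.Dict String String).getD "widgetId" "" < b.getD "widgetId" "")) x acc)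
        (acc.map mkItem) (l.map mkItem)
      = (List.foldl (fun acc x => PySem.List.insertBy (fun a b => decide (wkey a < wkey b)) x acc) acc l).map mkItem := by
    intro l
    induction l with
    | nil => intro acc; simp
    | cons x t ih =>
        intro acc
        simp only [List.map_cons, List.foldl_cons, insertBy_map]
        exact ih _
  simpa using main l []

theorem adjD_pw (l : List (List (String × String))) :
    ∀ (prev : Option String), l.Pairwise (fun a b => wkey a ≤ wkey b) →
      (∀ c, prev = some c → ∀ r ∈ l, c ≤ wkey r) →
      (adjD prev l).Pairwise (fun a b => wkey a < wkey b) ∧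
      (∀ x ∈ adjD prev l, ∀ c, prev = some c → c < wkey x) := by
  induction l with
  | nil => intro prev _ _; simp [adjD]
  | cons r t ih =>
      intro prev hpw hprev
      have hr : ∀ y ∈ t, wkey r ≤ wkey y := (List.pairwise_cons.mp hpw).1
      have hpt := (List.pairwise_cons.mp hpw).2
      by_cases h : (some (wkey r) == prev) = true
      · have hp : prev = some (wkey r) := (eq_of_beq h).symm
        simp only [adjD, if_pos h]
        refine ih prev hpt ?_
        intro c hc y hy
        rw [hp] at hc
        cases hc
        exact hr y hy
      · simp only [adjD, if_neg h]
        have ih2 := ih (some (wkey r)) hpt (by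
          intro c hc y hy
          cases hc
          exact hr y hy)
        constructor
        · refine List.pairwise_cons.mpr ⟨?_, ih2.1⟩
          intro x hx
          exact ih2.2 x hx (wkey r) rfl
        · intro x hx c hc
          rcases List.mem_cons.mp hx with rfl | hx'
          · have hle := hprev c hc x (List.mem_cons_self)
            refine lt_of_le_of_ne hle ?_
            intro e
            apply h
            rw [hc, ← e]
            simp
          · exact lt_trans (lt_of_le_of_ne (hprev c hc r List.mem_cons_self)
              (fun e => h (by rw [hc, ← e]; simp))) (ih2.2 x hx' (wkey r) rfl)

theorem L1 (S : List (List (String × String))) :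
    ∀ (prev : Option String) (r : List (String × String)),
      S.Pairwise (fun a b => wkey a ≤ wkey b) → wkey r ∈ S.map wkey →
      adjD prev (PySem.List.insertBy (fun a b => decide (wkey a < wkey b)) r S) = adjD prev S := by
  induction S with
  | nil => intro prev r _ hm; simp at hm
  | cons y t ih =>
      intro prev r hpw hm
      have hr : ∀ z ∈ t, wkey y ≤ wkey z := (List.pairwise_cons.mp hpw).1
      have hpt := (List.pairwise_cons.mp hpw).2
      have hm' : wkey r = wkey y ∨ wkey r ∈ t.map wkey := by simpa using hm
      have hge : ¬ (wkey r < wkey y) := by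
        rcases hm' with h1 | h1
        · simp [h1]
        · rcases List.mem_map.mp h1 with ⟨z, hz, hzk⟩
          rw [← hzk]
          exact not_lt.mpr (hr z hz)
      simp only [PySem.List.insertBy]
      rw [if_neg (by simpa using hge)]
      by_cases hmt : wkey r ∈ t.map wkey
      · simp only [adjD]
        by_cases hp : (some (wkey y) == prev) = true
        · rw [if_pos hp, if_pos hp]
          exact ih prev r hpt hmt
        · rw [if_neg hp, if_neg hp, ih _ r hpt hmt]
      · have heq : wkey r = wkey y := by
          rcases hm' with h1 | h1
          · exact h1
          · exact absurd h1 hmt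
        have hins : PySem.List.insertBy (fun a b => decide (wkey a < wkey b)) r t = r :: t := by
          cases t with
          | nil => simp [PySem.List.insertBy]
          | cons z t' =>
              have hlt : wkey r < wkey z := by
                refine lt_of_le_of_ne (heq ▸ hr z List.mem_cons_self) ?_
                intro e
                exact hmt (by simp [e])
              simp [PySem.List.insertBy, hlt]
        rw [hins]
        simp only [adjD]
        by_cases hp : (some (wkey y) == prev) = true
        · rw [if_pos hp, if_pos hp, if_pos (by rw [heq]; exact hp)]
        · rw [if_neg hp, if_neg hp, if_pos (by simp [heq])]

theorem L2 (S : List (List (String × String))) :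
    ∀ (prev : Option String) (r : List (String × String)),
      S.Pairwise (fun a b => wkey a ≤ wkey b) → wkey r ∉ S.map wkey →
      (∀ c, prev = some c → c < wkey r) →
      adjD prev (PySem.List.insertBy (fun a b => decide (wkey a < wkey b)) r S)
        = PySem.List.insertBy (fun a b => decide (wkey a < wkey b)) r (adjD prev S) := by
  induction S with
  | nil =>
      intro prev r _ _ hprev
      simp only [PySem.List.insertBy, adjD]
      rw [if_neg (fun h => absurd ((eq_of_beq h).symm) (by
        intro hp
        exact lt_irrefl _ (hprev _ hp)))]
  | cons y t ih =>
      intro prev r hpw hm hprev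
      have hne : wkey r ≠ wkey y := fun e => hm (by simp [e])
      have hr : ∀ z ∈ t, wkey y ≤ wkey z := (List.pairwise_cons.mp hpw).1
      have hpt := (List.pairwise_cons.mp hpw).2
      have hmt : wkey r ∉ t.map wkey := fun h1 => hm (by simp [h1])
      by_cases hlt : wkey r < wkey y
      · simp only [PySem.List.insertBy]
        rw [if_pos (by simpa using hlt)]
        by_cases hp : (some (wkey y) == prev) = true
        · exfalso
          have := hprev (wkey y) (eq_of_beq hp).symm
          exact absurd hlt (not_lt.mpr (le_of_lt this))
        · have h1 : (some (wkey r) == prev) = false := by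
            rw [Bool.eq_false_iff]
            intro hb
            exact lt_irrefl _ (hprev _ (eq_of_beq hb).symm)
          simp only [adjD]
          rw [if_neg (by simp [h1]), if_neg (by simp only [beq_iff_eq, Option.some.injEq]; exact fun e => hne e.symm), if_neg hp]
          simp only [PySem.List.insertBy]
          rw [if_pos (by simpa using hlt)]
      · simp only [PySem.List.insertBy]
        rw [if_neg (by simpa using hlt)]
        by_cases hp : (some (wkey y) == prev) = true
        · simp only [adjD]
          rw [if_pos hp, if_pos hp]
          exact ih prev r hpt hmt hprev
        · simp only [adjD]
          rw [if_neg hp, if_neg hp]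
          rw [ih (some (wkey y)) r hpt hmt (by
            intro c hc
            cases hc
            exact lt_of_le_of_ne (not_lt.mp hlt) (Ne.symm hne))]
          simp only [PySem.List.insertBy]
          rw [if_neg (by simpa using hlt)]

theorem insertBy_perm {α : Type} (bef : α → α → Bool) (x : α) (ys : List α) :
    (PySem.List.insertBy bef x ys).Perm (x :: ys) := by
  induction ys with
  | nil => simp [PySem.List.insertBy]
  | cons y t ih =>
      simp only [PySem.List.insertBy]
      by_cases h : bef x y = true
      · simp [h]
      · simp only [h]
        exact (ih.cons y).trans (List.Perm.swap x y t)

theorem dedupF_snoc (l : List (List (String × String))) :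
    ∀ (seen : List String) (r : List (String × String)),
      dedupF seen (l ++ [r])
        = dedupF seen l ++ (if wkey r ∈ seen ∨ wkey r ∈ l.map wkey then [] else [r]) := by
  induction l with
  | nil =>
      intro seen r
      by_cases h : wkey r ∈ seen
      · simp [dedupF, h]
      · simp [dedupF, h]
  | cons x l ih =>
      intro seen r
      by_cases hx : wkey x ∈ seen
      · simp only [List.cons_append, dedupF, if_pos hx]
        rw [ih]
        congr 1
        by_cases hrx : wkey r = wkey x
        · simp [hrx, hx]
        · simp [List.map_cons, List.mem_cons, hrx]
      · simp only [List.cons_append, dedupF, if_neg hx]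
        rw [ih]
        congr 2
        by_cases hrx : wkey r = wkey x
        · simp [hrx, List.mem_append]
        · simp only [List.mem_append, List.mem_cons, List.map_cons]
          by_cases hrs : wkey r ∈ seen
          · simp [hrs]
          · simp [hrs, hrx]

theorem P_perm (rows : List (List (String × String))) :
    (adjD none (PySem.List.sorted rows wkey false)).Perm (dedupF [] rows) := by
  induction rows using List.reverseRecOn with
  | nil => simp [PySem.List.sorted, adjD, dedupF]
  | append_singleton rows r ih =>
      rw [PySem.List.sorted_eq_foldl_insertBy, List.foldl_append, List.foldl_cons, List.foldl_nil,
          ← PySem.List.sorted_eq_foldl_insertBy]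
      by_cases hm : wkey r ∈ rows.map wkey
      · have hm' : wkey r ∈ (PySem.List.sorted rows wkey false).map wkey := by
          exact (((PySem.List.sorted_perm rows wkey false).map wkey).mem_iff).mpr hm
        rw [L1 _ none r (PySem.List.sorted_pairwise rows wkey) hm']
        rw [dedupF_snoc]
        simp only [hm, or_true, if_pos, List.append_nil]
        exact ih
      · have hm' : wkey r ∉ (PySem.List.sorted rows wkey false).map wkey := by
          intro h
          exact hm ((((PySem.List.sorted_perm rows wkey false).map wkey).mem_iff).mp h)
        rw [L2 _ none r (PySem.List.sorted_pairwise rows wkey) hm' (by simp)]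
        rw [dedupF_snoc]
        have : ¬ (wkey r ∈ ([] : List String) ∨ wkey r ∈ rows.map wkey) := by simpa using hm
        rw [if_neg this]
        refine (insertBy_perm _ r _).trans ?_
        refine ((ih.cons r).trans ?_)
        exact (List.perm_append_singleton r _).symm

theorem core (rows : List (List (String × String))) :
    PySem.List.sorted (dedupF [] rows) wkey false = adjD none (PySem.List.sorted rows wkey false) := by
  refine PySem.List.sorted_eq_of_perm_of_pairwise_lt _ _ _ (P_perm rows) ?_
  exact (adjD_pw _ none (PySem.List.sorted_pairwise rows wkey) (by simp)).1

theorem B_go (l : List (List (String × String))) :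
    ∀ (i : Int) (prev : Option String) (opts : List (List (String × String))),
      bGo i prev opts l = opts ++ labelFrom i (adjD prev l) := by
  induction l with
  | nil => intro i prev opts; simp [bGo, adjD, labelFrom]
  | cons r t ih =>
      intro i prev opts
      have hw : (PySem.Dict.mk r).getD "widgetId" "" = wkey r := rfl
      simp only [bGo, adjD, hw]
      by_cases h : (some (wkey r) == prev) = true
      · rw [if_pos h, if_pos h]
        exact ih i prev opts
      · rw [if_neg h, if_neg h]
        simp only [labelFrom]
        rw [ih]
        simp [brandOf, List.append_assoc]

theorem A_label (L : List (List (String × String))) :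
    ∀ (i : Int),
      ((PySem.List.enumerate (L.map mkItem) (i + 1)).map
        (fun p => p.2.insert "label" ("Widget " ++ PySem.Int.toStr p.1 ++ " - " ++ p.2.getD "brandName" ""))).map
        PySem.Dict.items = labelFrom i L := by
  induction L with
  | nil => intro i; rfl
  | cons r t ih =>
      intro i
      rw [List.map_cons, PySem.List.enumerate_cons, List.map_cons, List.map_cons]
      simp only [labelFrom]
      refine List.cons_eq_cons.mpr ⟨?_, ?_⟩
      · rw [branditem]
        simp [mkItem, PySem.Dict.insert, PySem.Dict.contains]
      · exact ih (i + 1)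

-- ===== VERDICT (by name: the statement is the Claim_ definition above) =====
theorem build_widget_options_spec : Claim_equal_build_widget_options := by
  intro rows _ _
  unfold Spec_build_widget_options build_widget_options build_widget_options_alt
  show (((PySem.List.enumerate (PySem.List.sorted ((rows.foldl aStep (PySem.Set.empty, [])).2)
      (fun item => item.getD "widgetId" "") false) 1).map
      (fun p => p.2.insert "label" ("Widget " ++ PySem.Int.toStr p.1 ++ " - " ++ p.2.getD "brandName" ""))).map
      PySem.Dict.items)
    = bGo 0 none [] (PySem.List.sorted rows (fun r => (PySem.Dict.mk r).getD "widgetId" "") false)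
  have he : (PySem.Set.empty : PySem.Set String) = ([] : List String) := rfl
  have hk : (fun r : List (String × String) => (PySem.Dict.mk r).getD "widgetId" "") = wkey := rfl
  rw [he, hk, A_fold rows [] [], List.nil_append, sorted_map_mkItem, core]
  rw [show (1 : Int) = 0 + 1 by ring, A_label, B_go, List.nil_append]
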